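-- pv_equiv track=rewrite | github.com/yejiin/Python-Study | 이코테/구현/문자열 압축.py | solution
-- ===== SOURCE A (Python) =====
-- def solution(s):
--     # 압축한 문자열의 길이가 가장 큰 경우는 문자열이 압축되지 않았을 때
--     answer = len(s)
--
--     # 자를 수 있는 단위는 문자열의 길이의 절반까지 (ex. len(s)=8, 4개 단위까지)
--     for i in range(1, len(s) // 2 + 1):
--         target = s[0:i]
--         compressed = ''
--         count = 1
--         for j in range(i, len(s), i):
--             if target == s[j:j+i]:
--                 count += 1
--             else:
--                 compressed += str(count) + target if count >= 2 else target
--                 target = s[j:j+i]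
--                 count = 1
--         compressed += str(count) + target if count >= 2 else target
--         answer = min(answer, len(compressed))
--     return answer
-- ===== SOURCE B (Python) =====
-- def solution(s):
--     n = len(s)
--     best = n
--     for i in range(1, n // 2 + 1):
--         # cut positions: the start, every multiple of i where the two adjacent
--         # i-blocks differ, and the end; run lengths are derived arithmetically
--         cuts = [0] + [j for j in range(i, n, i) if s[j - i:j] != s[j:j + i]] + [n]
--         total = 0
--         for p, q in zip(cuts, cuts[1:]):
--             r = -(-(q - p) // i)
--             total += min(i, q - p) + (len(str(r)) if r >= 2 else 0)
--         best = min(best, total)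
--     return best
-- ===== Notes on version B (the rewrite author's own statement) =====
-- stated objective: alternative
-- what changed: A builds each candidate compressed string with a target/count run-length state machine; B never maintains a run state or builds a string: it detects cut positions by comparing each i-block with the adjacent previous i-block, then derives every run length and digit cost arithmetically from consecutive cut positions (ceil division) and sums them.
import Mathlib
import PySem

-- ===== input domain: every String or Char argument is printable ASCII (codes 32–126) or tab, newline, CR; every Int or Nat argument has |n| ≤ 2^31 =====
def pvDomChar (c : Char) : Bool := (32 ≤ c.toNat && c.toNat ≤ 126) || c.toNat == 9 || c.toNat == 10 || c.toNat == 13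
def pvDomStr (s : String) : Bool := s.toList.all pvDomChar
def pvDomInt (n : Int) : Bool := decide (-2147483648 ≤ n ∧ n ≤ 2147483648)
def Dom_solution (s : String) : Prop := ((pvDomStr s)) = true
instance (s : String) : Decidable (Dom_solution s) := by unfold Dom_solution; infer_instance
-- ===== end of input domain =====

-- B replaces A's target/count run-length state machine (which builds each compressed
-- string) by boundary detection: it collects the cut positions where adjacent i-blocks
-- differ and derives each run's length and digit cost arithmetically from consecutive
-- cuts (objective: alternative algorithm, same asymptotic cost).

-- ===== PORT A =====
-- A's inner loop state: (compressed, target, count)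
def solution (s : String) : Int :=
  let cs := s.toList
  let n : Int := (cs.length : Int)
  (PySem.List.pyRange 1 (PySem.Int.floordiv n 2 + 1) 1).foldl (fun answer i =>
    let compressed :=
      (PySem.List.pyRange i n i).foldl
        (fun (st : List Char × List Char × Int) j =>
          if st.2.1 = PySem.List.slice cs (some j) (some (j + i)) then
            (st.1, st.2.1, st.2.2 + 1)
          else
            (st.1 ++ (if st.2.2 ≥ 2 then (PySem.Int.toChars st.2.2) ++ st.2.1 else st.2.1),
             PySem.List.slice cs (some j) (some (j + i)), 1))
        (([] : List Char), PySem.List.slice cs (some 0) (some i), (1 : Int))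
    let compressed := compressed.1 ++
      (if compressed.2.2 ≥ 2 then (PySem.Int.toChars compressed.2.2) ++ compressed.2.1 else compressed.2.1)
    min answer (compressed.length : Int)) n

-- ===== PORT B =====
-- Source B's comprehension condition: the i-block ending at j differs from the one starting at j
def bnd (cs : List Char) (i j : Int) : Bool :=
  !(PySem.List.slice cs (some (j - i)) (some j) == PySem.List.slice cs (some j) (some (j + i)))

-- Source B's inner loop body: total += min(i, q-p) + (len(str(r)) if r >= 2 else 0), r = -(-(q-p)//i)
def pairStep (i : Int) (tot : Int) (pq : Int × Int) : Int :=
  let r := -(PySem.Int.floordiv (-(pq.2 - pq.1)) i)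
  tot + (min i (pq.2 - pq.1) + (if r ≥ 2 then ((PySem.Int.toChars r).length : Int) else 0))

-- Source B's 'for p, q in zip(cuts, cuts[1:])' summation
def pairSum (i : Int) (l : List Int) : Int :=
  (l.zip (PySem.List.slice l (some 1) none)).foldl (pairStep i) 0

def solution_alt (s : String) : Int :=
  let cs := s.toList
  let n : Int := (cs.length : Int)
  (PySem.List.pyRange 1 (PySem.Int.floordiv n 2 + 1) 1).foldl (fun best i =>
    let cuts : List Int :=
      0 :: (((PySem.List.pyRange i n i).filter (fun j => bnd cs i j)) ++ [n])
    min best (pairSum i cuts)) n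

-- ===== PRECONDITION & SPEC =====
def Spec_solution (s : String) (out : Int) : Prop := out = solution_alt s
instance (s : String) (out : Int) : Decidable (Spec_solution s out) := by unfold Spec_solution; infer_instance

-- ===== CLAIM (what is proved, stated in full; the proofs are below) =====
def Claim_equal_solution : Prop := ∀ (s : String), Dom_solution s → Spec_solution s (solution s)

-- ===== LEMMAS AND PROOFS =====

-- length of one emitted piece of A's compressed string
def pieceLen (t : List Char) (c : Int) : Int :=
  (if c ≥ 2 then ((PySem.Int.toChars c).length : Int) else 0) + (t.length : Int)

def pieceChars (t : List Char) (c : Int) : List Char :=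
  if c ≥ 2 then (PySem.Int.toChars c) ++ t else t

-- A's inner loop step, on the chunk it reads at index j
def stepA (st : List Char × List Char × Int) (x : List Char) : List Char × List Char × Int :=
  if st.2.1 = x then (st.1, st.2.1, st.2.2 + 1)
  else (st.1 ++ pieceChars st.2.1 st.2.2, x, 1)

def finishA (st : List Char × List Char × Int) : Int :=
  ((st.1 ++ pieceChars st.2.1 st.2.2).length : Int)

-- A's inner loop, abstracted to the chunk list it consumes
def F (t : List Char) (c : Int) : List (List Char) → Int
  | [] => pieceLen t c
  | x :: xs => if t = x then F t (c + 1) xs else pieceLen t c + F x 1 xs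

theorem length_pieceChars (t : List Char) (c : Int) :
    ((pieceChars t c).length : Int) = pieceLen t c := by
  unfold pieceChars pieceLen
  split_ifs <;> push_cast [List.length_append] <;> ring

-- A-side: the fold over chunks, final length = comp.length + F t c l
theorem lenA_eq_F (l : List (List Char)) (comp t : List Char) (c : Int) :
    finishA (l.foldl stepA (comp, t, c)) = (comp.length : Int) + F t c l := by
  induction l generalizing comp t c with
  | nil => simp [finishA, F, length_pieceChars]
  | cons x xs ih =>
    simp only [List.foldl_cons, F, stepA]
    by_cases h : t = x
    · simp [h, ih]
    · simp only [h, if_false, ih]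
      rw [← length_pieceChars t c, List.length_append]
      push_cast
      ring

-- pyRange with positive step: peel the first element
theorem pyRange_cons_pos (a b s : Int) (hs : 0 < s) (hab : a < b) :
    PySem.List.pyRange a b s = a :: PySem.List.pyRange (a + s) b s := by
  rw [PySem.List.pyRange_of_pos _ _ hs, PySem.List.pyRange_of_pos _ _ hs]
  rw [if_pos hab]
  have h1 : ((b - a + s - 1) / s).toNat = ((b - (a + s) + s - 1) / s).toNat + 1 := by
    have e : b - a + s - 1 = (b - (a + s) + s - 1) + 1 * s := by ring
    rw [e, Int.add_mul_ediv_right _ _ (by omega : s ≠ 0)]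
    have h2 : 0 ≤ (b - (a + s) + s - 1) / s := by
      by_cases hc : a + s < b
      · exact Int.ediv_nonneg (by omega) (by omega)
      · have : b - (a + s) + s - 1 = b - a - 1 := by ring
        exact Int.ediv_nonneg (by omega) (by omega)
    omega
  by_cases hc : a + s < b
  · rw [if_pos hc, h1, List.range_succ_eq_map]
    rw [List.map_cons, List.map_map]
    congr 1
    · ring
    · apply List.map_congr_left
      intro k _
      simp only [Function.comp]
      push_cast
      ring
  · rw [if_neg hc]
    have hq : (b - (a + s) + s - 1) / s = 0 := by
      apply Int.ediv_eq_zero_of_lt <;> omega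
    rw [hq] at h1
    simp at h1
    rw [h1]
    simp

theorem pyRange_nil_pos (a b s : Int) (hs : 0 < s) (hab : b ≤ a) :
    PySem.List.pyRange a b s = [] := by
  rw [PySem.List.pyRange_of_pos _ _ hs, if_neg (by omega)]
  simp

-- Python's -(-D // i) is the ceiling of D / i
theorem ceil_div_eq (D i k : Int) (hi : 1 ≤ i) (h1 : (k - 1) * i < D) (h2 : D ≤ k * i) :
    -(PySem.Int.floordiv (-D) i) = k := by
  rw [PySem.Int.floordiv_eq_ediv_of_pos (by omega)]
  have e : -D = (k * i - D) + (-k) * i := by ring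
  rw [e, Int.add_mul_ediv_right _ _ (by omega : i ≠ 0)]
  have h3 : (k * i - D) / i = 0 := by
    apply Int.ediv_eq_zero_of_lt
    · omega
    · have : (k - 1) * i = k * i - i := by ring
      omega
  rw [h3]
  ring

-- length of the i-block starting at p
theorem chunk_length (cs : List Char) (p i : Int) (hp : 0 ≤ p) (hi : 0 ≤ i)
    (hpn : p ≤ (cs.length : Int)) :
    (((PySem.List.slice cs (some p) (some (p + i))).length : Int)) = min i ((cs.length : Int) - p) := by
  rw [PySem.List.slice_toNat cs hp (by omega)]
  simp only [List.length_take, List.length_drop]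
  omega

-- pairStep folds: the accumulator shifts out
theorem foldl_pairStep_shift (i : Int) (l : List (Int × Int)) (c : Int) :
    l.foldl (pairStep i) c = c + l.foldl (pairStep i) 0 := by
  induction l generalizing c with
  | nil => simp
  | cons x xs ih =>
    simp only [List.foldl_cons]
    rw [ih, ih (pairStep i 0 x)]
    simp only [pairStep]
    ring

theorem pairSum_cons (i a b : Int) (l : List Int) :
    pairSum i (a :: b :: l) = pairStep i 0 (a, b) + pairSum i (b :: l) := by
  unfold pairSum
  rw [PySem.List.slice_from_one, PySem.List.slice_from_one]
  simp only [List.tail_cons, List.zip_cons_cons, List.foldl_cons]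
  rw [foldl_pairStep_shift]

theorem pairSum_pair (i a b : Int) : pairSum i [a, b] = pairStep i 0 (a, b) := by
  unfold pairSum
  rw [PySem.List.slice_from_one]
  simp

-- MAIN: B's cut-pair summation from a partially scanned run equals A's machine (as F).
-- p0 = start of the current run, p = current chunk, k = chunks seen in the run so far.
theorem main_eq (cs : List Char) (i : Int) (hi : 1 ≤ i) (p p0 k : Int)
    (h0 : 0 ≤ p0) (hpp : p0 ≤ p) (hpn : p < (cs.length : Int)) (hk1 : 1 ≤ k)
    (hk : p - p0 = (k - 1) * i)
    (ht : PySem.List.slice cs (some p) (some (p + i)) = PySem.List.slice cs (some p0) (some (p0 + i))) :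
    pairSum i (p0 :: ((PySem.List.pyRange (p + i) (cs.length : Int) i).filter (fun j => bnd cs i j) ++ [(cs.length : Int)]))
    = F (PySem.List.slice cs (some p0) (some (p0 + i))) k
        ((PySem.List.pyRange (p + i) (cs.length : Int) i).map
          (fun j => PySem.List.slice cs (some j) (some (j + i)))) := by
  by_cases hj : p + i < (cs.length : Int)
  · rw [pyRange_cons_pos (p + i) _ i (by omega) hj]
    simp only [List.filter_cons, List.map_cons]
    have ebnd : bnd cs i (p + i)
        = !(PySem.List.slice cs (some p) (some (p + i)) == PySem.List.slice cs (some (p + i)) (some (p + i + i))) := by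
      have e : p + i - i = p := by ring
      unfold bnd
      rw [e]
    by_cases hb : PySem.List.slice cs (some p) (some (p + i)) = PySem.List.slice cs (some (p + i)) (some (p + i + i))
    · -- adjacent blocks equal: no cut, A's machine extends the run
      have hbf : bnd cs i (p + i) = false := by rw [ebnd, hb]; simp
      rw [hbf]
      simp only [Bool.false_eq_true, if_false]
      rw [F]
      rw [if_pos (by rw [← ht, hb])]
      exact main_eq cs i hi (p + i) p0 (k + 1) h0 (by omega) hj (by omega)
        (by linear_combination hk) (by rw [← hb, ht])
    · -- adjacent blocks differ: a cut; A's machine emits the piece for the finished run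
      have hbt : bnd cs i (p + i) = true := by
        rw [ebnd]
        simp only [Bool.not_eq_true']
        rw [beq_eq_false_iff_ne]
        exact hb
      rw [hbt]
      simp only [if_true, List.cons_append]
      rw [pairSum_cons, F]
      rw [if_neg (by rw [ht] at hb; exact hb)]
      rw [main_eq cs i hi (p + i) (p + i) 1 (by omega) (by omega) hj (by omega) (by ring) rfl]
      have hlen : ((PySem.List.slice cs (some p0) (some (p0 + i))).length : Int) = i := by
        rw [chunk_length cs p0 i h0 (by omega) (by omega)]
        omega
      have hr : -(PySem.Int.floordiv (-(p + i - p0)) i) = k := by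
        apply ceil_div_eq _ _ _ hi
        · omega
        · have : k * i = (k - 1) * i + i := by ring
          omega
      simp only [pairStep, pieceLen, hr, hlen]
      have hmin : min i (p + i - p0) = i := by
        have : (0:Int) ≤ (k - 1) * i := mul_nonneg (by omega) (by omega)
        omega
      rw [hmin]
      ring
  · -- the scan is over: one final pair (p0, n) against A's final emission
    rw [pyRange_nil_pos _ _ _ (by omega) (by omega)]
    simp only [List.nil_append, List.map_nil, List.filter_nil]
    rw [pairSum_pair, F]
    have hr : -(PySem.Int.floordiv (-((cs.length : Int) - p0)) i) = k := by
      apply ceil_div_eq _ _ _ hi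
      · omega
      · have : k * i = (k - 1) * i + i := by ring
        omega
    have hlen : ((PySem.List.slice cs (some p0) (some (p0 + i))).length : Int)
        = min i ((cs.length : Int) - p0) :=
      chunk_length cs p0 i h0 (by omega) (by omega)
    simp only [pairStep, pieceLen, hr, hlen]
    ring
termination_by ((cs.length : Int) - p).toNat
decreasing_by all_goals omega

-- per chunk size i: A's compressed length equals B's cut-pair total
theorem inner_eq (cs : List Char) (i : Int) (hi : 1 ≤ i) (hn : 2 * i ≤ (cs.length : Int)) :
    finishA ((PySem.List.pyRange i (cs.length : Int) i).foldl
        (fun st j => stepA st (PySem.List.slice cs (some j) (some (j + i))))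
        (([] : List Char), PySem.List.slice cs (some 0) (some i), (1 : Int)))
    = pairSum i (0 :: ((PySem.List.pyRange i (cs.length : Int) i).filter (fun j => bnd cs i j)
        ++ [(cs.length : Int)])) := by
  have h := main_eq cs i hi 0 0 1 le_rfl le_rfl (by omega) le_rfl (by ring) rfl
  rw [← List.foldl_map, lenA_eq_F]
  simp only [List.length_nil, Int.natCast_zero, zero_add]
  have e : (0 : Int) + i = i := by ring
  rw [e] at h
  exact h.symm

-- ===== VERDICT (by name: the statement is the Claim_ definition above) =====
theorem solution_spec : Claim_equal_solution := by
  intro s _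
  unfold Spec_solution solution solution_alt
  simp only []
  apply PySem.List.foldl_congr_mem
  intro answer i hi
  rw [PySem.List.mem_pyRange_one] at hi
  congr 1
  have h2 : (0:Int) < 2 := by omega
  have hfd : PySem.Int.floordiv (s.toList.length : Int) 2 = (s.toList.length : Int) / 2 :=
    PySem.Int.floordiv_eq_ediv_of_pos h2
  rw [hfd] at hi
  have hle : 2 * i ≤ (s.toList.length : Int) := by omega
  exact inner_eq s.toList i (by omega) hle
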